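-- pv_equiv track=rewrite | github.com/aso2001/LeetCode | 1802-maximum-value-at-a-given-index-in-a-bounded-array/1802-maximum-value-at-a-given-index-in-a-bounded-array.py | maxValue2
-- ===== SOURCE A (Python) =====
-- def maxValue2(n: int, index: int, maxSum: int) -> int:
--     # TLE solution
--     if maxSum == n: return 1
--     ss = n + 1
--     res = 2
--     while True:
--         if index - res < 0 and index + res >= n:
--             ss += n
--         elif index - res >= 0 and index + res >= n:
--             ss += n - index - 1 + res
--         elif index - res < 0 and index + res < n:
--             ss += index + res
--         elif index - res >= 0 and index + res < n:
--             ss += 2*res - 1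
--         if ss > maxSum:
--             return res
--         res += 1
-- ===== SOURCE B (Python) =====
-- def maxValue2(n: int, index: int, maxSum: int) -> int:
--     # The array starts as all ones with the peak raised to 2 (sum n + 1); growth
--     # step s raises the peak by one more and costs 1 + min(index, s) + min(n-1-index, s).
--     # Find the first growth step the budget cannot afford by galloping + binary search.
--     if maxSum == n:
--         return 1
--     left, right = index, n - 1 - index
--
--     def ramp(side, m):
--         # sum of min(side, s) for s = 1..m, in closed form
--         if side <= 0:
--             return side * m
--         if m <= side:
--             return m * (m + 1) // 2
--         return side * (side + 1) // 2 + side * (m - side)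
--
--     def cost(steps):
--         return n + 1 + steps + ramp(left, steps) + ramp(right, steps)
--
--     if cost(1) > maxSum:
--         return 2
--     lo, hi = 1, 2
--     while cost(hi) <= maxSum:
--         lo, hi = hi, hi * 2
--     while hi - lo > 1:
--         mid = (lo + hi) // 2
--         if cost(mid) > maxSum:
--             hi = mid
--         else:
--             lo = mid
--     return hi + 1
-- ===== Notes on version B (the rewrite author's own statement) =====
-- stated objective: faster
-- what changed: Replaced A's loop that grows the peak one unit per iteration while accumulating incremental costs with a closed-form (clipped arithmetic series) growth-cost formula and a galloping + binary search for the first unaffordable growth step; Pre_ excludes only the inputs on which A's 'while True' loop never terminates.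
import Mathlib
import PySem

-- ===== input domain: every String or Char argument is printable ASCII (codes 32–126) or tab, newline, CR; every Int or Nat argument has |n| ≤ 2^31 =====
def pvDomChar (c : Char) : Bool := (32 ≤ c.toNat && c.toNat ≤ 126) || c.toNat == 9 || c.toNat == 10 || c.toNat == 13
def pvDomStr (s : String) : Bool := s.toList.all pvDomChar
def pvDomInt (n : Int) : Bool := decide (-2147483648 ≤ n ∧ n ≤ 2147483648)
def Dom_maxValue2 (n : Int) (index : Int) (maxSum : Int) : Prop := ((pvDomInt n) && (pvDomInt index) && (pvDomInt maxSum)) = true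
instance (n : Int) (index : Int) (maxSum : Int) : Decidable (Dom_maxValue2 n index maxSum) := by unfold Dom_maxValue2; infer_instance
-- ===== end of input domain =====

-- B replaces A's unit-step peak growth with a closed-form growth-cost formula and a
-- galloping + binary search for the first unaffordable growth step (objective: faster).


-- ===== PORT A =====
-- the body of A's while-loop: the four-branch increment added to ss at step res
def deltaA (n : Int) (index : Int) (res : Int) : Int :=
  if index - res < 0 ∧ index + res ≥ n then n
  else if index - res ≥ 0 ∧ index + res ≥ n then n - index - 1 + res
  else if index - res < 0 ∧ index + res < n then index + res
  else if index - res ≥ 0 ∧ index + res < n then 2 * res - 1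
  else 0
-- A's 'while True' loop; the fuel only makes the recursion total (under Pre_ it never runs out)
def loopA (n : Int) (index : Int) (maxSum : Int) : Nat → Int → Int → Int
  | 0, _, res => res
  | fuel + 1, ss, res =>
    let ss' := ss + deltaA n index res
    if ss' > maxSum then res else loopA n index maxSum fuel ss' (res + 1)

def fuelA (n : Int) (index : Int) (maxSum : Int) : Nat :=
  (index.natAbs + (n - 1 - index).natAbs) * (index.natAbs + (n - 1 - index).natAbs) +
    (index.natAbs + (n - 1 - index).natAbs) + maxSum.natAbs + 10

def maxValue2 (n : Int) (index : Int) (maxSum : Int) : Int :=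
  if maxSum = n then 1
  else loopA n index maxSum (fuelA n index maxSum) (n + 1) 2

-- ===== PORT B =====
-- B's 'ramp': sum of min(side, s) for s = 1..m, in closed form
def rampB (side : Int) (m : Int) : Int :=
  if side ≤ 0 then side * m
  else if m ≤ side then PySem.Int.floordiv (m * (m + 1)) 2
  else PySem.Int.floordiv (side * (side + 1)) 2 + side * (m - side)
-- B's 'cost': the array sum after `steps` growth steps from the all-ones-plus-peak-2 start
def costB (n : Int) (index : Int) (steps : Int) : Int :=
  n + 1 + steps + rampB index steps + rampB (n - 1 - index) steps
-- B's galloping loop; the fuel only makes the recursion total (it never runs out)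
def gallopB (n : Int) (index : Int) (maxSum : Int) : Nat → Int → Int → Int × Int
  | 0, lo, hi => (lo, hi)
  | fuel + 1, lo, hi =>
    if costB n index hi ≤ maxSum then gallopB n index maxSum fuel hi (hi * 2)
    else (lo, hi)

def gfuelB (n : Int) (index : Int) (maxSum : Int) : Nat :=
  (index.natAbs + (n - 1 - index).natAbs) * (index.natAbs + (n - 1 - index).natAbs) +
    (index.natAbs + (n - 1 - index).natAbs) + maxSum.natAbs + 10
-- B's binary-search loop; again the fuel is only a totality device
def shrinkB (n : Int) (index : Int) (maxSum : Int) : Nat → Int → Int → Int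
  | 0, _, hi => hi
  | fuel + 1, lo, hi =>
    if hi - lo > 1 then
      if costB n index (PySem.Int.floordiv (lo + hi) 2) > maxSum then
        shrinkB n index maxSum fuel lo (PySem.Int.floordiv (lo + hi) 2)
      else shrinkB n index maxSum fuel (PySem.Int.floordiv (lo + hi) 2) hi
    else hi

def searchB (n : Int) (index : Int) (maxSum : Int) : Int :=
  let p := gallopB n index maxSum (gfuelB n index maxSum) 1 2
  shrinkB n index maxSum ((p.2 - p.1).toNat + 1) p.1 p.2

def maxValue2_alt (n : Int) (index : Int) (maxSum : Int) : Int :=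
  if maxSum = n then 1
  else if costB n index 1 > maxSum then 2
  else searchB n index maxSum + 1

-- ===== PRECONDITION & SPEC =====
-- Pre_ is exactly the set of inputs on which A's 'while True' loop terminates: either
-- maxSum = n, or n ≥ 1 (the increment saturates at n ≥ 1, so ss grows past maxSum), or
-- the very first iteration already pushes ss past maxSum.  Outside Pre_ A never returns.
def Pre_maxValue2 (n : Int) (index : Int) (maxSum : Int) : Prop :=
  maxSum = n ∨ 1 ≤ n ∨ maxSum < n + 2 + min index 1 + min (n - 1 - index) 1
instance (n : Int) (index : Int) (maxSum : Int) : Decidable (Pre_maxValue2 n index maxSum) := by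
  unfold Pre_maxValue2; infer_instance

def pvWitness_maxValue2 : Int × Int × Int := (4, 2, 6)

def Spec_maxValue2 (n : Int) (index : Int) (maxSum : Int) (out : Int) : Prop := out = maxValue2_alt n index maxSum
instance (n : Int) (index : Int) (maxSum : Int) (out : Int) : Decidable (Spec_maxValue2 n index maxSum out) := by unfold Spec_maxValue2; infer_instance

-- ===== CLAIM (what is proved, stated in full; the proofs are below) =====
def Claim_equal_maxValue2 : Prop := ∀ (n : Int) (index : Int) (maxSum : Int), Dom_maxValue2 n index maxSum → Pre_maxValue2 n index maxSum → Spec_maxValue2 n index maxSum (maxValue2 n index maxSum)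

-- ===== LEMMAS AND PROOFS =====

-- the cost of growth step k, as one formula over all integers
def dStep (n : Int) (index : Int) (k : Int) : Int :=
  1 + min index k + min (n - 1 - index) k

-- the growth step from which dStep is saturated (equal to n)
def KK (n : Int) (index : Int) : Int := max (max index (n - 1 - index)) 0

-- "s is the first growth step the budget cannot afford"; both programs return s + 1
def FC (n : Int) (index : Int) (maxSum : Int) (s : Int) : Prop :=
  1 ≤ s ∧ maxSum < costB n index s ∧ ∀ s', 1 ≤ s' → s' < s → costB n index s' ≤ maxSum

theorem ramp_eq (I m : Int) :
    rampB I m = if I ≤ 0 then I * m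
      else if m ≤ I then (m * (m + 1)) / 2
      else (I * (I + 1)) / 2 + I * (m - I) := by
  unfold rampB
  rw [PySem.Int.floordiv_eq_ediv_of_pos (by norm_num),
      PySem.Int.floordiv_eq_ediv_of_pos (by norm_num)]

theorem mul_succ_even (x : Int) : x * (x + 1) % 2 = 0 := by
  rcases Int.even_or_odd x with ⟨k, hk⟩ | ⟨k, hk⟩
  · have e : x * (x + 1) = 2 * (k * (x + 1)) := by rw [hk]; ring
    omega
  · have e : x * (x + 1) = 2 * (x * (k + 1)) := by rw [hk]; ring
    omega

theorem ramp_zero (I : Int) : rampB I 0 = 0 := by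
  rw [ramp_eq]
  split_ifs with h1 h2
  · exact mul_zero I
  · norm_num
  · omega

theorem ramp_one (I : Int) : rampB I 1 = min I 1 := by
  rw [ramp_eq]
  split_ifs with h1 h2
  · have e : I * 1 = I := mul_one I
    omega
  · norm_num; omega
  · omega

theorem ramp_succ (I m : Int) (hm : 0 ≤ m) : rampB I (m + 1) = rampB I m + min I (m + 1) := by
  rw [ramp_eq, ramp_eq]
  by_cases h1 : I ≤ 0
  · rw [if_pos h1, if_pos h1]
    have e : I * (m + 1) = I * m + I := by ring
    omega
  · rw [if_neg h1, if_neg h1]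
    by_cases h2 : m + 1 ≤ I
    · rw [if_pos h2, if_pos (by omega : m ≤ I)]
      have h3 := mul_succ_even m
      have h4 := mul_succ_even (m + 1)
      have e : (m + 1) * (m + 1 + 1) = m * (m + 1) + 2 * (m + 1) := by ring
      omega
    · rw [if_neg h2]
      by_cases h5 : m ≤ I
      · have hmI : I = m := by omega
        subst hmI
        rw [if_pos h5]
        have e : I * (I + 1 - I) = I := by ring
        have h3 := mul_succ_even I
        omega
      · rw [if_neg h5]
        have e : I * (m + 1 - I) = I * (m - I) + I := by ring
        omega

theorem ramp_lb (I m : Int) (hm : 0 ≤ m) : -(|I| * m) ≤ rampB I m := by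
  rw [ramp_eq]
  split_ifs with h1 h2
  · have e : |I| * m = -(I * m) := by rw [abs_of_nonpos h1]; ring
    omega
  · have e1 : 0 ≤ |I| * m := mul_nonneg (abs_nonneg I) hm
    have e2 : 0 ≤ m * (m + 1) := mul_nonneg hm (by omega)
    omega
  · have e1 : 0 ≤ |I| * m := mul_nonneg (abs_nonneg I) hm
    have e2 : 0 ≤ I * (I + 1) := mul_nonneg (by omega) (by omega)
    have e3 : 0 ≤ I * (m - I) := mul_nonneg (by omega) (by omega)
    omega

theorem cost_zero (n index : Int) : costB n index 0 = n + 1 := by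
  unfold costB
  rw [ramp_zero, ramp_zero]
  ring

theorem cost_one (n index : Int) :
    costB n index 1 = n + 2 + min index 1 + min (n - 1 - index) 1 := by
  unfold costB
  rw [ramp_one, ramp_one]
  ring

theorem cost_succ (n index s : Int) (hs : 0 ≤ s) :
    costB n index (s + 1) = costB n index s + dStep n index (s + 1) := by
  unfold costB dStep
  rw [ramp_succ index s hs, ramp_succ (n - 1 - index) s hs]
  ring

theorem dStep_mono (n index k k' : Int) (h : k ≤ k') : dStep n index k ≤ dStep n index k' := by
  unfold dStep; omega

theorem dStep_sat (n index k : Int) (h : KK n index ≤ k) : dStep n index k = n := by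
  unfold dStep KK at *; omega

theorem deltaA_eq (n index res : Int) : deltaA n index res = dStep n index (res - 1) := by
  unfold deltaA dStep
  split_ifs <;> omega

theorem KK_props (n index : Int) :
    0 ≤ KK n index ∧ index ≤ KK n index ∧ n - 1 - index ≤ KK n index ∧
      KK n index ≤ |index| + |n - 1 - index| := by
  have h1 := le_abs_self index
  have h2 := le_abs_self (n - 1 - index)
  have h3 := abs_nonneg index
  have h4 := abs_nonneg (n - 1 - index)
  unfold KK
  omega

theorem cost_sat (n index : Int) : ∀ (s : Nat),
    costB n index (KK n index + (s : Int)) = costB n index (KK n index) + (s : Int) * n := by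
  intro s
  induction s with
  | zero => norm_num
  | succ s ih =>
    have hK := KK_props n index
    have hrec := cost_succ n index (KK n index + (s : Int)) (by omega)
    have hsat : dStep n index (KK n index + (s : Int) + 1) = n :=
      dStep_sat n index _ (by omega)
    have e2 : ((s : Int) + 1) * n = (s : Int) * n + n := by ring
    push_cast
    rw [show KK n index + ((s : Int) + 1) = (KK n index + (s : Int)) + 1 by ring]
    omega

theorem cost_lb (n index : Int) :
    n + 1 + KK n index - (|index| + |n - 1 - index|) * KK n index ≤
      costB n index (KK n index) := by
  have hK := KK_props n index
  have c1 := ramp_lb index (KK n index) hK.1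
  have c2 := ramp_lb (n - 1 - index) (KK n index) hK.1
  have e : (|index| + |n - 1 - index|) * KK n index =
      |index| * KK n index + |n - 1 - index| * KK n index := by ring
  unfold costB
  omega

theorem cost_big (n index maxSum : Int) (hn : 1 ≤ n) (s : Int)
    (hs : KK n index +
        (maxSum + (|index| + |n - 1 - index|) * (|index| + |n - 1 - index|) + 1) ≤ s)
    (hs2 : KK n index ≤ s) :
    maxSum < costB n index s := by
  have hK := KK_props n index
  have hsat := cost_sat n index (s - KK n index).toNat
  have hcast : (((s - KK n index).toNat : Int)) = s - KK n index := by omega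
  rw [hcast, show KK n index + (s - KK n index) = s by ring] at hsat
  have hlb := cost_lb n index
  have hKa : KK n index * (|index| + |n - 1 - index|) ≤
      (|index| + |n - 1 - index|) * (|index| + |n - 1 - index|) :=
    mul_le_mul_of_nonneg_right hK.2.2.2 (le_trans hK.1 hK.2.2.2)
  have hcomm : (|index| + |n - 1 - index|) * KK n index =
      KK n index * (|index| + |n - 1 - index|) := mul_comm _ _
  have hsn : s - KK n index ≤ (s - KK n index) * n := by
    have h0 : 0 ≤ s - KK n index := by omega
    nlinarith
  omega

theorem cost_dec (n index : Int) : ∀ (t : Nat) (s : Int), s = 1 + (t : Int) →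
    dStep n index s ≤ 0 → costB n index s ≤ costB n index 1 := by
  intro t
  induction t with
  | zero => intro s hs _; rw [hs]; norm_num
  | succ u ih =>
    intro s hs hd
    have h1 : costB n index s = costB n index (s - 1) + dStep n index s := by
      have := cost_succ n index (s - 1) (by omega)
      rwa [show s - 1 + 1 = s by ring] at this
    have h2 : dStep n index (s - 1) ≤ dStep n index s := dStep_mono n index _ _ (by omega)
    have h3 : costB n index (s - 1) ≤ costB n index 1 := by
      apply ih (s - 1) (by omega)
      omega
    omega

theorem cost_step_up (n index maxSum : Int) (h1 : costB n index 1 ≤ maxSum)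
    (s : Int) (hs : 1 ≤ s) (h : maxSum < costB n index s) :
    maxSum < costB n index (s + 1) := by
  have hrec : costB n index (s + 1) = costB n index s + dStep n index (s + 1) :=
    cost_succ n index s (by omega)
  by_cases hd : 0 ≤ dStep n index (s + 1)
  · omega
  · exfalso
    have hds : dStep n index s ≤ 0 := by
      have := dStep_mono n index s (s + 1) (by omega)
      omega
    have := cost_dec n index (s - 1).toNat s (by omega) hds
    omega

theorem cost_tail (n index maxSum : Int) (h1 : costB n index 1 ≤ maxSum) :
    ∀ (t : Nat) (s : Int), 1 ≤ s → maxSum < costB n index s →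
      maxSum < costB n index (s + (t : Int)) := by
  intro t
  induction t with
  | zero => intro s _ h; simpa using h
  | succ u ih =>
    intro s hs h
    have h2 := ih s hs h
    have h3 := cost_step_up n index maxSum h1 (s + (u : Int)) (by omega) h2
    push_cast
    rw [show s + ((u : Int) + 1) = s + (u : Int) + 1 by ring]
    exact h3

theorem fc_unique (n index maxSum s1 s2 : Int)
    (h1 : FC n index maxSum s1) (h2 : FC n index maxSum s2) : s1 = s2 := by
  obtain ⟨a1, b1, c1⟩ := h1
  obtain ⟨a2, b2, c2⟩ := h2
  by_contra hne
  rcases lt_or_gt_of_ne hne with h | h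
  · have := c2 s1 a1 h; omega
  · have := c1 s2 a2 h; omega

theorem loopA_fc (n index maxSum : Int) : ∀ (fuel : Nat) (res : Int), 2 ≤ res →
    (∀ s', 1 ≤ s' → s' ≤ res - 2 → costB n index s' ≤ maxSum) →
    (∃ t : Nat, t < fuel ∧ maxSum < costB n index (res - 1 + (t : Int))) →
    FC n index maxSum (loopA n index maxSum fuel (costB n index (res - 2)) res - 1) := by
  intro fuel
  induction fuel with
  | zero => rintro res _ _ ⟨t, ht, _⟩; omega
  | succ m ih =>
    rintro res hres hpre ⟨t, ht, hcross⟩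
    have hst : costB n index (res - 2) + deltaA n index res = costB n index (res - 1) := by
      rw [deltaA_eq]
      have := cost_succ n index (res - 2) (by omega)
      rw [show res - 2 + 1 = res - 1 by ring] at this
      omega
    rw [loopA]
    simp only [hst]
    split_ifs with h
    · exact ⟨by omega, by omega, by intro s' hs1 hs2; exact hpre s' hs1 (by omega)⟩
    · have hpre' : ∀ s', 1 ≤ s' → s' ≤ res + 1 - 2 → costB n index s' ≤ maxSum := by
        intro s' hs1 hs2
        by_cases hr : s' ≤ res - 2
        · exact hpre s' hs1 hr
        · have hseq : s' = res - 1 := by omega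
          rw [hseq]
          omega
      have hex' : ∃ t : Nat, t < m ∧ maxSum < costB n index (res + 1 - 1 + (t : Int)) := by
        cases t with
        | zero =>
          exfalso
          apply h
          have e : res - 1 + ((0 : Nat) : Int) = res - 1 := by push_cast; ring
          rw [e] at hcross
          omega
        | succ t' =>
          refine ⟨t', by omega, ?_⟩
          push_cast at hcross
          rwa [show res - 1 + ((t' : Int) + 1) = res + 1 - 1 + (t' : Int) by ring] at hcross
      have hrec := ih (res + 1) (by omega) hpre' hex'
      rw [show res + 1 - 2 = res - 1 by ring] at hrec
      exact hrec

theorem gallop_fc (n index maxSum : Int) : ∀ (fuel : Nat) (lo hi : Int), 1 ≤ lo → lo < hi →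
    costB n index lo ≤ maxSum →
    (∃ t : Nat, t < fuel ∧ maxSum < costB n index (hi * 2 ^ (t : Nat))) →
    1 ≤ (gallopB n index maxSum fuel lo hi).1 ∧
      (gallopB n index maxSum fuel lo hi).1 < (gallopB n index maxSum fuel lo hi).2 ∧
      costB n index (gallopB n index maxSum fuel lo hi).1 ≤ maxSum ∧
      maxSum < costB n index (gallopB n index maxSum fuel lo hi).2 := by
  intro fuel
  induction fuel with
  | zero => rintro lo hi _ _ _ ⟨t, ht, _⟩; omega
  | succ m ih =>
    rintro lo hi hlo hlt hfit ⟨t, ht, hcross⟩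
    rw [gallopB]
    split_ifs with h
    · apply ih hi (hi * 2) (by omega) (by omega) h
      cases t with
      | zero =>
        exfalso
        rw [pow_zero, mul_one] at hcross
        omega
      | succ t' =>
        refine ⟨t', by omega, ?_⟩
        rwa [show hi * 2 ^ (t' + 1) = hi * 2 * 2 ^ t' by rw [pow_succ]; ring] at hcross
    · refine ⟨hlo, hlt, hfit, ?_⟩
      show maxSum < costB n index hi
      omega

theorem shrink_fc (n index maxSum : Int) : ∀ (fuel : Nat) (lo hi : Int), 1 ≤ lo → lo < hi →
    (hi - lo).toNat ≤ fuel → costB n index lo ≤ maxSum → maxSum < costB n index hi →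
    lo < shrinkB n index maxSum fuel lo hi ∧ shrinkB n index maxSum fuel lo hi ≤ hi ∧
      maxSum < costB n index (shrinkB n index maxSum fuel lo hi) ∧
      costB n index (shrinkB n index maxSum fuel lo hi - 1) ≤ maxSum := by
  intro fuel
  induction fuel with
  | zero => intro lo hi _ h hf; omega
  | succ m ih =>
    intro lo hi hlo hlt hf hfit hbig
    rw [shrinkB]
    have hmid : PySem.Int.floordiv (lo + hi) 2 = (lo + hi) / 2 :=
      PySem.Int.floordiv_eq_ediv_of_pos (by norm_num)
    split_ifs with h hc
    · have := ih lo (PySem.Int.floordiv (lo + hi) 2) hlo (by omega) (by omega) hfit hc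
      omega
    · have := ih (PySem.Int.floordiv (lo + hi) 2) hi (by omega) (by omega) (by omega)
        (by omega) hbig
      omega
    · refine ⟨by omega, le_rfl, hbig, ?_⟩
      rw [show hi - 1 = lo by omega]
      exact hfit

theorem natAbs_sum (n index : Int) :
    ((index.natAbs + (n - 1 - index).natAbs : Nat) : Int) = |index| + |n - 1 - index| := by
  push_cast
  rw [Int.abs_eq_natAbs, Int.abs_eq_natAbs]

theorem natAbs_sum_sq (n index : Int) :
    (((index.natAbs + (n - 1 - index).natAbs) * (index.natAbs + (n - 1 - index).natAbs) : Nat) : Int)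
      = (|index| + |n - 1 - index|) * (|index| + |n - 1 - index|) := by
  push_cast
  rw [Int.abs_eq_natAbs, Int.abs_eq_natAbs]

theorem K_le_sq (K : Int) (hK : 0 ≤ K) : K ≤ K * K := by
  nlinarith

-- ===== VERDICT (by name: the statement is the Claim_ definition above) =====
theorem maxValue2_spec : Claim_equal_maxValue2 := by
  intro n index maxSum _ hpre
  show maxValue2 n index maxSum = maxValue2_alt n index maxSum
  by_cases h0 : maxSum = n
  · unfold maxValue2 maxValue2_alt
    rw [if_pos h0, if_pos h0]
  have hAeq : maxValue2 n index maxSum =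
      loopA n index maxSum (fuelA n index maxSum) (costB n index (2 - 2)) 2 := by
    unfold maxValue2
    rw [if_neg h0, show (2 : Int) - 2 = 0 by norm_num, cost_zero]
  have hK := KK_props n index
  have hab := natAbs_sum n index
  have hsq := natAbs_sum_sq n index
  have hKsq := K_le_sq (|index| + |n - 1 - index|) (by positivity)
  by_cases h1 : costB n index 1 > maxSum
  · -- first growth step already unaffordable: both return 2
    have hA : FC n index maxSum (maxValue2 n index maxSum - 1) := by
      rw [hAeq]
      apply loopA_fc n index maxSum (fuelA n index maxSum) 2 le_rfl
        (by intro s' h2 h3; omega)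
      refine ⟨0, by unfold fuelA; omega, ?_⟩
      rw [show (2 : Int) - 1 + ((0 : Nat) : Int) = 1 by norm_num]
      exact h1
    have hB : FC n index maxSum 1 := ⟨le_rfl, h1, by intro s' h2 h3; omega⟩
    have := fc_unique n index maxSum _ _ hA hB
    unfold maxValue2_alt
    rw [if_neg h0, if_pos h1]
    omega
  · push_neg at h1
    have hn : 1 ≤ n := by
      rcases hpre with h | h | h
      · omega
      · exact h
      · exfalso
        have := cost_one n index
        omega
    -- A's result minus one is the first unaffordable step
    have hA : FC n index maxSum (maxValue2 n index maxSum - 1) := by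
      rw [hAeq]
      apply loopA_fc n index maxSum (fuelA n index maxSum) 2 le_rfl
        (by intro s' h2 h3; omega)
      refine ⟨(KK n index + maxSum +
        (|index| + |n - 1 - index|) * (|index| + |n - 1 - index|)).toNat, ?_, ?_⟩
      · unfold fuelA
        omega
      · have hco := cost_one n index
        apply cost_big n index maxSum hn _ (by push_cast; omega) (by push_cast; omega)
    -- B's result minus one is the first unaffordable step too
    have hgal := gallop_fc n index maxSum (gfuelB n index maxSum) 1 2 le_rfl (by norm_num) h1
      ?ex
    case ex =>
      refine ⟨(KK n index + (maxSum +
        (|index| + |n - 1 - index|) * (|index| + |n - 1 - index|) + 1)).toNat, ?_, ?_⟩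
      · unfold gfuelB
        have hco := cost_one n index
        omega
      · set t := (KK n index + (maxSum +
          (|index| + |n - 1 - index|) * (|index| + |n - 1 - index|) + 1)).toNat with htdef
        have hpow : (t : Int) < (2 : Int) ^ t := by
          exact_mod_cast Nat.lt_two_pow_self
        have hpow0 : (0 : Int) ≤ (2 : Int) ^ t := by positivity
        have hco := cost_one n index
        apply cost_big n index maxSum hn _ (by omega) (by omega)
    set p := gallopB n index maxSum (gfuelB n index maxSum) 1 2 with hp
    obtain ⟨g1, g2, g3, g4⟩ := hgal
    have hsh := shrink_fc n index maxSum ((p.2 - p.1).toNat + 1) p.1 p.2 g1 g2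
      (by omega) g3 g4
    set r := shrinkB n index maxSum ((p.2 - p.1).toNat + 1) p.1 p.2 with hr
    obtain ⟨s1, s2, s3, s4⟩ := hsh
    have hB : FC n index maxSum r := by
      refine ⟨by omega, s3, ?_⟩
      intro s' hs1 hs2
      by_contra hcon
      push_neg at hcon
      have := cost_tail n index maxSum h1 (r - 1 - s').toNat s' hs1 hcon
      rw [show s' + (((r - 1 - s').toNat : Nat) : Int) = r - 1 by omega] at this
      omega
    have hBr : maxValue2_alt n index maxSum = r + 1 := by
      unfold maxValue2_alt searchB
      rw [if_neg h0, if_neg (by omega)]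
    have := fc_unique n index maxSum _ _ hA hB
    omega
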